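-- pv_equiv track=rewrite | github.com/BullEJ/Lychrel-Numbers-Graphs | utilities.py | is_seed_t1l9
-- ===== SOURCE A (Python) =====
-- from functools import reduce
--
-- def blq(t: tuple, i: int, c_pos = True):
--     try:
--         if c_pos and 0 > i: raise IndexError
--         return t[i]
--     except IndexError: return 0
--
-- def is_seed_t1l9(fri_s, paridad): # Adaptable al caso (9 -> 0).
--     # Supondré que no eres un perkin y el primer digito es mayor a 0.
--     c = reduce(   # Esto se tiene que pasar a generador para que valga la pena.
--             lambda c, i: c + ((blq(c, -2, False) + i) % 2, ),
--             fri_s[:-1], tuple())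
--     for i, s in enumerate(fri_s[1:-1], 1):                               # (M2)
--         if ((s == 0  and blq(c, i - 1) == 0 and c[i] == 1) or
--             (s == 18 and blq(c, i - 1) == 1 and c[i] == 0)):
--             return True
--
--     if ((paridad and (fri_s[-1] - 2 * blq(c, -2, False)) % 4) or         # (M3)
--         (not paridad and (fri_s[-1]
--                           + blq(c, -1, False)
--                           + blq(c, -2, False)) % 2)):
--         return True
--     return False
-- ===== SOURCE B (Python) =====
-- def is_seed_t1l9(fri_s, paridad):
--     # One forward pass keeping only the last two parity values (a = c[k-2], b = c[k-1]).
--     a = b = 0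
--     first = True
--     for d in fri_s[:-1]:
--         cur = (a + d) % 2
--         if not first and ((d == 0 and b == 0 and cur == 1) or
--                           (d == 18 and b == 1 and cur == 0)):
--             return True
--         first = False
--         a, b = b, cur
--     last = fri_s[-1]
--     if paridad:
--         return (last - 2 * a) % 4 != 0
--     return (last + b + a) % 2 != 0
-- ===== Notes on version B (the rewrite author's own statement) =====
-- stated objective: faster
-- what changed: Replaces A's reduce-built parity tuple plus index-based M2 scan (blq lookups into the full tuple) by a single forward loop over fri_s[:-1] that keeps only the last two parity values and applies the M2 test on the fly; the M3 test then uses the two retained values.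
-- outside the precondition, e.g. on is_seed_t1l9([], True): A raises IndexError, B raises IndexError
import Mathlib
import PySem

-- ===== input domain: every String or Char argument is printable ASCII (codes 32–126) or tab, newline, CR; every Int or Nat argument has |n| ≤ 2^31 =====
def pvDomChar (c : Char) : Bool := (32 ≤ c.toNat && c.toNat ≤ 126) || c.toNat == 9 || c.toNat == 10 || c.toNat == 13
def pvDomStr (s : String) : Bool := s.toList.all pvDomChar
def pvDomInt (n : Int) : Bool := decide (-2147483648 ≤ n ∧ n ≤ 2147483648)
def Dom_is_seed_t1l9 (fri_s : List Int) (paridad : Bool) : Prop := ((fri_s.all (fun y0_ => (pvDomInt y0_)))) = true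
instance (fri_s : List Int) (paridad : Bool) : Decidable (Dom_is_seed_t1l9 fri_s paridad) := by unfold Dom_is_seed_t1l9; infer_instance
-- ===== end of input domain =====

-- B replaces A's reduce-built parity tuple and index-based scan by one forward loop that keeps only
-- the last two parity values (objective: faster — O(n) vs A's quadratic tuple concatenation, measured).

-- ===== PORT A =====
-- blq(t, i, c_pos): 0 on a (real or forced) IndexError, else t[i]
def blq (t : List Int) (i : Int) (c_pos : Bool) : Int :=
  if c_pos && decide (0 > i) then 0 else (PySem.List.pyGet? t i).getD 0

-- one step of A's reduce: c + ((blq(c,-2,False) + i) % 2,)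
def aStep (c : List Int) (i : Int) : List Int :=
  c ++ [PySem.Int.mod (blq c (-2) false + i) 2]

-- A's M2 loop over enumerate(fri_s[1:-1], 1) with early return True
def aM2 (c : List Int) : List (Int × Int) → Bool
  | [] => false
  | (i, s) :: rest =>
    if (s == 0 && blq c (i - 1) true == 0 && (PySem.List.pyGet? c i).getD 0 == 1) ||
       (s == 18 && blq c (i - 1) true == 1 && (PySem.List.pyGet? c i).getD 0 == 0) then
      true
    else aM2 c rest

def is_seed_t1l9 (fri_s : List Int) (paridad : Bool) : Bool :=
  let c := (PySem.List.slice fri_s none (some (-1))).foldl aStep []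
  if aM2 c (PySem.List.enumerate (PySem.List.slice fri_s (some 1) (some (-1))) 1) then true
  else
    let last := (PySem.List.pyGet? fri_s (-1)).getD 0   -- IndexError (fri_s = []) excluded by Pre_
    if (paridad && !(PySem.Int.mod (last - 2 * blq c (-2) false) 4 == 0)) ||
       (!paridad && !(PySem.Int.mod (last + blq c (-1) false + blq c (-2) false) 2 == 0)) then
      true
    else false

-- ===== PORT B =====
-- B's loop: state (first, a, b) with a = c[k-2], b = c[k-1] (0 when missing); none = early `return True`
def bLoop : List Int → Bool → Int → Int → Option (Int × Int)
  | [], _, a, b => some (a, b)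
  | d :: rest, first, a, b =>
    let cur := PySem.Int.mod (a + d) 2
    if !first && ((d == 0 && b == 0 && cur == 1) || (d == 18 && b == 1 && cur == 0)) then none
    else bLoop rest false b cur

def is_seed_t1l9_alt (fri_s : List Int) (paridad : Bool) : Bool :=
  match bLoop (PySem.List.slice fri_s none (some (-1))) true 0 0 with
  | none => true
  | some (a, b) =>
    let last := (PySem.List.pyGet? fri_s (-1)).getD 0   -- IndexError (fri_s = []) excluded by Pre_
    if paridad then !(PySem.Int.mod (last - 2 * a) 4 == 0)
    else !(PySem.Int.mod (last + b + a) 2 == 0)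

-- ===== PRECONDITION & SPEC =====
-- Pre_ excludes only the empty list, on which A raises IndexError at fri_s[-1].
def Pre_is_seed_t1l9 (fri_s : List Int) (paridad : Bool) : Prop := fri_s ≠ []
instance (fri_s : List Int) (paridad : Bool) : Decidable (Pre_is_seed_t1l9 fri_s paridad) := by
  unfold Pre_is_seed_t1l9; infer_instance

def pvWitness_is_seed_t1l9 : List Int × Bool := ([1, 0, 3], true)

def Spec_is_seed_t1l9 (fri_s : List Int) (paridad : Bool) (out : Bool) : Prop := out = is_seed_t1l9_alt fri_s paridad
instance (fri_s : List Int) (paridad : Bool) (out : Bool) : Decidable (Spec_is_seed_t1l9 fri_s paridad out) := by unfold Spec_is_seed_t1l9; infer_instance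

-- ===== CLAIM (what is proved, stated in full; the proofs are below) =====
def Claim_equal_is_seed_t1l9 : Prop := ∀ (fri_s : List Int) (paridad : Bool), Dom_is_seed_t1l9 fri_s paridad → Pre_is_seed_t1l9 fri_s paridad → Spec_is_seed_t1l9 fri_s paridad (is_seed_t1l9 fri_s paridad)

-- ===== LEMMAS AND PROOFS =====

-- the sequence of parity values c, expressed by B's two-value recurrence
def cvals : List Int → Int → Int → List Int
  | [], _, _ => []
  | d :: rest, a, b =>
    let cur := PySem.Int.mod (a + d) 2
    cur :: cvals rest b cur

lemma last_append_singleton (acc : List Int) (x : Int) :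
    (PySem.List.pyGet? (acc ++ [x]) (-1)).getD 0 = x := by
  simp [PySem.List.pyGet?_neg_one_append_singleton]

lemma penult_append_singleton (acc : List Int) (x : Int) :
    (PySem.List.pyGet? (acc ++ [x]) (-2)).getD 0 = (PySem.List.pyGet? acc (-1)).getD 0 := by
  cases acc with
  | nil => simp [PySem.List.pyGet?, PySem.List.pyIdx?]
  | cons y ys =>
    rw [PySem.List.pyGet?_neg_ofNat ((y :: ys) ++ [x]) 2 (by omega) (by simp)]
    rw [PySem.List.pyGet?_neg_one]
    have h1 : ((y :: ys) ++ [x]).length - 2 = ys.length := by simp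
    have h3 : (y :: ys).length - 1 = ys.length := by simp
    rw [h1, List.getLast?_eq_getElem?, h3, List.getElem?_append_left (by simp)]

lemma foldl_aStep_eq_cvals (xs : List Int) :
    ∀ (acc : List Int) (a b : Int),
      (PySem.List.pyGet? acc (-2)).getD 0 = a →
      (PySem.List.pyGet? acc (-1)).getD 0 = b →
      xs.foldl aStep acc = acc ++ cvals xs a b := by
  induction xs with
  | nil => intro acc a b _ _; simp [cvals]
  | cons d rest ih =>
    intro acc a b ha hb
    have hstep : aStep acc d = acc ++ [PySem.Int.mod (a + d) 2] := by
      simp [aStep, blq, ha]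
    rw [List.foldl_cons, hstep,
        ih (acc ++ [PySem.Int.mod (a + d) 2]) b (PySem.Int.mod (a + d) 2)
          (by rw [penult_append_singleton, hb]) (last_append_singleton _ _)]
    simp [cvals]

lemma get_prefix_pred (cpre : List Int) (ys : List Int) (h : cpre ≠ []) :
    (PySem.List.pyGet? (cpre ++ ys) ((cpre.length : Int) - 1)).getD 0
      = (PySem.List.pyGet? cpre (-1)).getD 0 := by
  have hlen : 0 < cpre.length := List.length_pos_iff.mpr h
  rw [PySem.List.pyGet?_of_nonneg (xs := cpre ++ ys) (i := (cpre.length : Int) - 1) (by omega),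
      PySem.List.pyGet?_neg_one]
  have h1 : ((cpre.length : Int) - 1).toNat = cpre.length - 1 := by omega
  rw [h1, List.getElem?_append_left (by omega), List.getLast?_eq_getElem?]

lemma get_at_length (cpre : List Int) (y : Int) (ys : List Int) :
    (PySem.List.pyGet? (cpre ++ y :: ys) (cpre.length : Int)).getD 0 = y := by
  rw [PySem.List.pyGet?_append_length]; rfl

lemma main_lemma (xs : List Int) :
    ∀ (cpre : List Int) (a b : Int), cpre ≠ [] →
      (PySem.List.pyGet? cpre (-2)).getD 0 = a →
      (PySem.List.pyGet? cpre (-1)).getD 0 = b →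
      (aM2 (cpre ++ cvals xs a b) (PySem.List.enumerate xs (cpre.length : Int))
          = (bLoop xs false a b).isNone)
      ∧ (∀ a' b', bLoop xs false a b = some (a', b') →
          (PySem.List.pyGet? (cpre ++ cvals xs a b) (-2)).getD 0 = a'
          ∧ (PySem.List.pyGet? (cpre ++ cvals xs a b) (-1)).getD 0 = b') := by
  induction xs with
  | nil =>
    intro cpre a b _ ha hb
    refine ⟨by simp [cvals, aM2, bLoop, PySem.List.enumerate], ?_⟩
    intro a' b' hsome
    simp [bLoop] at hsome
    simp [cvals, ← hsome.1, ← hsome.2, ha, hb]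
  | cons d rest ih =>
    intro cpre a b hne ha hb
    have hcur : cvals (d :: rest) a b
        = PySem.Int.mod (a + d) 2 :: cvals rest b (PySem.Int.mod (a + d) 2) := by
      simp [cvals]
    have henum : PySem.List.enumerate (d :: rest) (cpre.length : Int)
        = ((cpre.length : Int), d) :: PySem.List.enumerate rest ((cpre.length : Int) + 1) := by
      simp [PySem.List.enumerate_cons]
    have hblq1 : blq (cpre ++ cvals (d :: rest) a b) ((cpre.length : Int) - 1) true = b := by
      have hlen : 0 < cpre.length := List.length_pos_iff.mpr hne
      have h0 : ¬ ((0:Int) > (cpre.length : Int) - 1) := by omega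
      unfold blq
      rw [if_neg (by simp [h0]), get_prefix_pred cpre _ hne, hb]
    have hgetc : (PySem.List.pyGet? (cpre ++ cvals (d :: rest) a b) (cpre.length : Int)).getD 0
        = PySem.Int.mod (a + d) 2 := by
      rw [hcur]; exact get_at_length cpre _ _
    have hbstep : bLoop (d :: rest) false a b =
        if ((d == 0 && b == 0 && PySem.Int.mod (a + d) 2 == 1) ||
            (d == 18 && b == 1 && PySem.Int.mod (a + d) 2 == 0)) then none
        else bLoop rest false b (PySem.Int.mod (a + d) 2) := by
      simp only [bLoop, Bool.not_false, Bool.true_and]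
    have hastep : aM2 (cpre ++ cvals (d :: rest) a b)
          (PySem.List.enumerate (d :: rest) (cpre.length : Int)) =
        if ((d == 0 && b == 0 && PySem.Int.mod (a + d) 2 == 1) ||
            (d == 18 && b == 1 && PySem.Int.mod (a + d) 2 == 0)) then true
        else aM2 (cpre ++ cvals (d :: rest) a b)
              (PySem.List.enumerate rest ((cpre.length : Int) + 1)) := by
      rw [henum]
      simp only [aM2, hblq1, hgetc]
    by_cases hcond : ((d == 0 && b == 0 && PySem.Int.mod (a + d) 2 == 1) ||
        (d == 18 && b == 1 && PySem.Int.mod (a + d) 2 == 0)) = true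
    · refine ⟨?_, ?_⟩
      · rw [hastep, if_pos hcond, hbstep, if_pos hcond]; rfl
      · intro a' b' hsome
        rw [hbstep, if_pos hcond] at hsome
        exact absurd hsome (by simp)
    · have hrec := ih (cpre ++ [PySem.Int.mod (a + d) 2]) b (PySem.Int.mod (a + d) 2) (by simp)
        (by rw [penult_append_singleton, hb]) (last_append_singleton _ _)
      have hassoc : cpre ++ cvals (d :: rest) a b
          = (cpre ++ [PySem.Int.mod (a + d) 2]) ++ cvals rest b (PySem.Int.mod (a + d) 2) := by
        rw [hcur]; simp
      have hlen' : (((cpre ++ [PySem.Int.mod (a + d) 2]).length : Int)) = (cpre.length : Int) + 1 := by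
        simp
      refine ⟨?_, ?_⟩
      · rw [hastep, if_neg hcond, hbstep, if_neg hcond, hassoc, ← hlen']
        exact hrec.1
      · intro a' b' hsome
        rw [hbstep, if_neg hcond] at hsome
        rw [hassoc]
        exact hrec.2 a' b' hsome

-- ===== VERDICT (by name: the statement is the Claim_ definition above) =====
theorem is_seed_t1l9_spec : Claim_equal_is_seed_t1l9 := by
  intro fri_s paridad _ hpre
  unfold Spec_is_seed_t1l9
  obtain ⟨ys, x, rfl⟩ : ∃ ys x, fri_s = ys ++ [x] := by
    rcases List.eq_nil_or_concat fri_s with h | ⟨ys, x, h⟩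
    · exact absurd h hpre
    · exact ⟨ys, x, by rw [h, List.concat_eq_append]⟩
  have hslice1 : PySem.List.slice (ys ++ [x]) none (some (-1)) = ys := by
    rw [PySem.List.slice_to_neg_one]; simp
  have hlast : (PySem.List.pyGet? (ys ++ [x]) (-1)).getD 0 = x := last_append_singleton ys x
  have hslice2 : PySem.List.slice (ys ++ [x]) (some 1) (some (-1)) = ys.tail := by
    cases ys with
    | nil => simp [PySem.List.slice, PySem.List.clampIdx]
    | cons y t =>
      simp [PySem.List.slice, PySem.List.clampIdx]
      rw [if_neg (by omega)]
      simp
  cases ys with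
  | nil =>
    cases paridad
    · simp [is_seed_t1l9, is_seed_t1l9_alt, hslice1, hslice2, hlast, aM2, bLoop, blq,
        PySem.List.enumerate, cvals, PySem.List.slice, PySem.List.clampIdx, aStep,
        PySem.List.pyGet?, PySem.List.pyIdx?]
      rcases Int.emod_two_eq x with h | h <;> simp [h]
    · simp [is_seed_t1l9, is_seed_t1l9_alt, hslice1, hslice2, hlast, aM2, bLoop, blq,
        PySem.List.enumerate, cvals, PySem.List.slice, PySem.List.clampIdx, aStep,
        PySem.List.pyGet?, PySem.List.pyIdx?]
      rw [show ((x % 4 == 0)) = decide (x % 4 = 0) from rfl, decide_eq_decide]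
      omega
  | cons d rest =>
    have hc : (d :: rest).foldl aStep [] = cvals (d :: rest) 0 0 :=
      foldl_aStep_eq_cvals _ [] 0 0 (by decide) (by decide)
    have hcons : cvals (d :: rest) 0 0
        = [PySem.Int.mod (0 + d) 2] ++ cvals rest 0 (PySem.Int.mod (0 + d) 2) := rfl
    have hmain := main_lemma rest [PySem.Int.mod (0 + d) 2] 0 (PySem.Int.mod (0 + d) 2)
      (by simp)
      (by simp [PySem.List.pyGet?, PySem.List.pyIdx?])
      (by rw [PySem.List.pyGet?_neg_one]; rfl)
    have hb0 : bLoop (d :: rest) true 0 0 = bLoop rest false 0 (PySem.Int.mod (0 + d) 2) := by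
      simp only [bLoop, Bool.not_true, Bool.false_and, Bool.false_eq_true, if_false]
    have hlen1 : (([PySem.Int.mod (0 + d) 2] : List Int).length : Int) = 1 := by simp
    rw [is_seed_t1l9, is_seed_t1l9_alt, hslice1, hslice2, hlast, hc, hb0,
        show (d :: rest).tail = rest from rfl, hcons, ← hlen1]
    cases hbl : bLoop rest false 0 (PySem.Int.mod (0 + d) 2) with
    | none =>
      rw [hmain.1, hbl]
      simp
    | some ab =>
      obtain ⟨a, b⟩ := ab
      have h2 := hmain.2 a b hbl
      rw [hmain.1, hbl]
      have hba : blq ([PySem.Int.mod (0 + d) 2] ++ cvals rest 0 (PySem.Int.mod (0 + d) 2)) (-2) false = a := by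
        simp only [blq, Bool.false_and, Bool.false_eq_true, if_false]
        exact h2.1
      have hbb : blq ([PySem.Int.mod (0 + d) 2] ++ cvals rest 0 (PySem.Int.mod (0 + d) 2)) (-1) false = b := by
        simp only [blq, Bool.false_and, Bool.false_eq_true, if_false]
        exact h2.2
      simp only [Option.isNone_some, Bool.false_eq_true, if_false, hba, hbb]
      cases paridad
      · simp
        simp at hbb
        rw [hbb]
        rcases Int.emod_two_eq (x + b + a) with h | h <;> simp [h]
      · simp
        rw [show (((x - 2 * a) % 4 == 0)) = decide ((x - 2 * a) % 4 = 0) from rfl,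
            decide_eq_decide]
        omega
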